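-- pv_equiv track=rewrite | github.com/anyweez/newsy | utils/metrics.py | count_diff
-- ===== SOURCE A (Python) =====
-- def _increase(mapping, country):
--     if country in mapping:
--         mapping[country] += 1
--     else:
--         mapping[country] = 1
--
-- def count_diff(base, compare):
--     b_count = {}
--     c_count = {}
--     result = {}
--
--     # For each base document, iterate over its labels and
--     for doc in base:
--         if 'labels' in doc:
--             for country in doc['labels']['countries']:
--                 _increase(b_count, country)
--
--     for doc in compare:
--         if 'labels' in doc:
--             for country in doc['labels']['countries']:
--                 _increase(c_count, country)
--
--     for key in set(b_count.keys()).union(set(c_count.keys())):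
--         b = b_count[key] if key in b_count else 0
--         c = c_count[key] if key in c_count else 0
--         result[key] = c - b
--
--     return result
-- ===== SOURCE B (Python) =====
-- def count_diff(base, compare):
--     result = {}
--     for doc in base:
--         if 'labels' in doc:
--             for country in doc['labels']['countries']:
--                 result[country] = result.get(country, 0) - 1
--     for doc in compare:
--         if 'labels' in doc:
--             for country in doc['labels']['countries']:
--                 result[country] = result.get(country, 0) + 1
--     return result
-- ===== Notes on version B (the rewrite author's own statement) =====
-- stated objective: simpler
-- what changed: One running signed-count dict (subtract 1 per base label, add 1 per compare label) replaces the two per-set count dicts plus the set-union reconciliation pass.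
import Mathlib
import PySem

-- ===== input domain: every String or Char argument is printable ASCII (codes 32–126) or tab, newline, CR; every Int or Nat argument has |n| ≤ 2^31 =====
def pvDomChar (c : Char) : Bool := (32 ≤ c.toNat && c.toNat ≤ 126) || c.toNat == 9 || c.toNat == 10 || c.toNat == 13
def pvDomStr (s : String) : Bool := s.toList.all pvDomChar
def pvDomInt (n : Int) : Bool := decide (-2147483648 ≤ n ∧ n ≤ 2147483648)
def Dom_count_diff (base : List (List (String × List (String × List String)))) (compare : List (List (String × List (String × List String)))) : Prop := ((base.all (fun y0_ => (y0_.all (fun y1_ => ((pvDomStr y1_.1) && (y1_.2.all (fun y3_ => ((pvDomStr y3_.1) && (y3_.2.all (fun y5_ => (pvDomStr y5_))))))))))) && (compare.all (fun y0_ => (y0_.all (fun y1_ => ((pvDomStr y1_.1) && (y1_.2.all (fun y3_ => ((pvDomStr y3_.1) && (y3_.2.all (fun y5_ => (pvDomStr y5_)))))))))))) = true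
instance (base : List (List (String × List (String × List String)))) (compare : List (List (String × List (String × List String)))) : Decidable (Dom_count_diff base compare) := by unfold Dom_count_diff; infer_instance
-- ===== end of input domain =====

-- B keeps one running signed-count dict instead of A's two count dicts plus a union pass (objective: simpler).
-- A's final Python loop iterates a set (hash order); the returned dict is compared as a dict, order-insensitively;
-- both Lean ports use insertion order.

-- ===== PORT A =====
-- doc['labels']['countries'] access shared by both ports; [] stands for the KeyError case excluded by Pre_.
def docCountries (doc : List (String × List (String × List String))) : List String :=
  match (PySem.Dict.ofList doc).get? "labels" with
  | none => []
  | some lab => (PySem.Dict.ofList lab).getD "countries" []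

-- _increase from the Python module
def increase (d : PySem.Dict String Int) (country : String) : PySem.Dict String Int :=
  if d.contains country then d.insert country (d.getD country 0 + 1)
  else d.insert country 1

def count_diff (base : List (List (String × List (String × List String)))) (compare : List (List (String × List (String × List String)))) : List (String × Int) :=
  let b_count := base.foldl (fun d doc => (docCountries doc).foldl increase d) PySem.Dict.empty
  let c_count := compare.foldl (fun d doc => (docCountries doc).foldl increase d) PySem.Dict.empty
  let keys := PySem.Set.union (PySem.Set.ofList b_count.keys) (PySem.Set.ofList c_count.keys)
  (keys.foldl (fun r k => r.insert k (c_count.getD k 0 - b_count.getD k 0)) PySem.Dict.empty).items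

-- ===== PORT B =====
-- result[country] = result.get(country, 0) + delta, over one doc
def bump (delta : Int) (d : PySem.Dict String Int) (doc : List (String × List (String × List String))) : PySem.Dict String Int :=
  (docCountries doc).foldl (fun r c => r.insert c (r.getD c 0 + delta)) d

def count_diff_alt (base : List (List (String × List (String × List String)))) (compare : List (List (String × List (String × List String)))) : List (String × Int) :=
  (compare.foldl (bump 1) (base.foldl (bump (-1)) PySem.Dict.empty)).items

-- ===== PRECONDITION & SPEC =====
-- Pre_ excludes exactly the inputs where Python raises KeyError: a doc whose 'labels' dict has no 'countries' key
-- (both A and B raise there).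
def Pre_count_diff (base : List (List (String × List (String × List String)))) (compare : List (List (String × List (String × List String)))) : Prop :=
  ((base ++ compare).all (fun doc =>
    match (PySem.Dict.ofList doc).get? "labels" with
    | none => true
    | some lab => (PySem.Dict.ofList lab).contains "countries")) = true
instance (base : List (List (String × List (String × List String)))) (compare : List (List (String × List (String × List String)))) : Decidable (Pre_count_diff base compare) := by unfold Pre_count_diff; infer_instance
def pvWitness_count_diff : (List (List (String × List (String × List String)))) × (List (List (String × List (String × List String)))) :=
  ([[("labels", [("countries", ["us", "fr", "us"])])], [("title", [])]],
   [[("labels", [("countries", ["fr", "de"])])]])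

def Spec_count_diff (base : List (List (String × List (String × List String)))) (compare : List (List (String × List (String × List String)))) (out : List (String × Int)) : Prop := out = count_diff_alt base compare
instance (base : List (List (String × List (String × List String)))) (compare : List (List (String × List (String × List String)))) (out : List (String × Int)) : Decidable (Spec_count_diff base compare out) := by unfold Spec_count_diff; infer_instance

-- ===== CLAIM (what is proved, stated in full; the proofs are below) =====
def Claim_equal_count_diff : Prop := ∀ (base : List (List (String × List (String × List String)))) (compare : List (List (String × List (String × List String)))), Dom_count_diff base compare → Pre_count_diff base compare → Spec_count_diff base compare (count_diff base compare)

-- ===== LEMMAS AND PROOFS =====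

-- nested per-doc loop = one loop over the flattened label list
theorem foldl_flat {α β γ : Type} (f : α → List β) (g : γ → β → γ) :
    ∀ (docs : List α) (d : γ), docs.foldl (fun d doc => (f doc).foldl g d) d = (docs.flatMap f).foldl g d := by
  intro docs
  induction docs with
  | nil => intro d; rfl
  | cons doc rest ih =>
    intro d
    simp [List.flatMap_cons, List.foldl_append, ih]

theorem increase_eq (d : PySem.Dict String Int) (c : String) :
    increase d c = d.insert c (d.getD c 0 + 1) := by
  unfold increase
  by_cases h : d.contains c = true
  · simp [h]
  · simp only [Bool.not_eq_true] at h
    rw [if_neg (by simp [h]), PySem.Dict.getD_of_not_contains d 0 h]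
    norm_num

theorem foldl_increase_eq (L : List String) :
    ∀ d : PySem.Dict String Int,
      L.foldl increase d = L.foldl (fun d x => d.insert x (d.getD x 0 + 1)) d := by
  induction L with
  | nil => intro d; rfl
  | cons c rest ih => intro d; simp only [List.foldl_cons, increase_eq, ih]

theorem count_eq_counter (L : List String) :
    L.foldl increase PySem.Dict.empty = PySem.Dict.counter L := by
  rw [foldl_increase_eq, PySem.Dict.foldl_insert_getD_add_one_eq_counter]

-- getD through B's signed insert loop
theorem getD_signed_foldl (delta : Int) (L : List String) :
    ∀ (d : PySem.Dict String Int) (k : String),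
      (L.foldl (fun r c => r.insert c (r.getD c 0 + delta)) d).getD k 0
        = d.getD k 0 + delta * L.count k := by
  induction L with
  | nil => intro d k; simp
  | cons c rest ih =>
    intro d k
    simp only [List.foldl_cons, ih]
    rw [PySem.Dict.getD_insert]
    by_cases h : k = c
    · subst h; simp [List.count_cons_self]; ring
    · have hck : c ≠ k := fun hh => h hh.symm
      rw [if_neg h, List.count_cons_of_ne hck]

theorem keys_signed_foldl (delta : Int) (L : List String) (d : PySem.Dict String Int) :
    (L.foldl (fun r c => r.insert c (r.getD c 0 + delta)) d).keys = PySem.Set.update d.keys L :=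
  PySem.Dict.keys_foldl_insert L _ d

-- union with a deduplicated second argument = union with the raw list
theorem update_ofList {α : Type} [BEq α] [LawfulBEq α] (s : PySem.Set α) (L : List α) :
    PySem.Set.update s (PySem.Set.ofList L) = PySem.Set.update s L := by
  rw [PySem.Set.update_eq_append_filter, PySem.Set.update_eq_append_filter,
    PySem.Set.ofList_ofList]

theorem count_diff_eq (base compare : List (List (String × List (String × List String)))) :
    count_diff base compare
      = (PySem.Set.ofList (base.flatMap docCountries ++ compare.flatMap docCountries)).map
          (fun k => (k, ((compare.flatMap docCountries).count k : Int)
                          - ((base.flatMap docCountries).count k : Int))) := by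
  simp only [count_diff]
  rw [foldl_flat, foldl_flat, count_eq_counter, count_eq_counter]
  set Lb := base.flatMap docCountries with hLb
  set Lc := compare.flatMap docCountries with hLc
  have hkeys : PySem.Set.union (PySem.Set.ofList (PySem.Dict.counter Lb).keys)
      (PySem.Set.ofList (PySem.Dict.counter Lc).keys) = PySem.Set.ofList (Lb ++ Lc) := by
    rw [PySem.Dict.keys_counter, PySem.Dict.keys_counter, PySem.Set.ofList_ofList,
      PySem.Set.ofList_ofList, PySem.Set.ofList_append]
    rw [PySem.Set.union, update_ofList]
  rw [hkeys]
  rw [PySem.Dict.items_foldl_insert_fresh (k := fun x => x)]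
  · rw [show PySem.Dict.empty.items = ([] : List (String × Int)) from rfl, List.nil_append]
    apply List.map_congr_left
    intro k _
    simp [PySem.Dict.getD_counter]
  · intro a _; exact PySem.Dict.contains_empty a
  · simp

theorem count_diff_alt_eq (base compare : List (List (String × List (String × List String)))) :
    count_diff_alt base compare
      = (PySem.Set.ofList (base.flatMap docCountries ++ compare.flatMap docCountries)).map
          (fun k => (k, ((compare.flatMap docCountries).count k : Int)
                          - ((base.flatMap docCountries).count k : Int))) := by
  simp only [count_diff_alt]
  have hb : ∀ δ : Int, bump δ = fun d doc =>
      (docCountries doc).foldl (fun r c => r.insert c (r.getD c 0 + δ)) d := fun _ => rfl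
  rw [hb, hb, foldl_flat, foldl_flat]
  set Lb := base.flatMap docCountries with hLb
  set Lc := compare.flatMap docCountries with hLc
  set D := Lc.foldl (fun r c => r.insert c (r.getD c 0 + 1))
      (Lb.foldl (fun r c => r.insert c (r.getD c 0 + (-1))) PySem.Dict.empty) with hD
  have hkeys : D.keys = PySem.Set.ofList (Lb ++ Lc) := by
    rw [hD, keys_signed_foldl, keys_signed_foldl, PySem.Dict.keys_empty,
      PySem.Set.update_nil_left, PySem.Set.ofList_append]
  have hnd : D.keys.Nodup := by rw [hkeys]; exact PySem.Set.nodup_ofList _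
  rw [PySem.Dict.items_eq_map_keys D hnd 0, hkeys]
  apply List.map_congr_left
  intro k _
  have : D.getD k 0 = (Lc.count k : Int) - (Lb.count k : Int) := by
    rw [hD, getD_signed_foldl, getD_signed_foldl]
    simp; ring
  rw [this]

-- ===== VERDICT (by name: the statement is the Claim_ definition above) =====
theorem count_diff_spec : Claim_equal_count_diff := by
  intro base compare _ _
  unfold Spec_count_diff
  rw [count_diff_eq, count_diff_alt_eq]
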